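-- pv_equiv track=rewrite | github.com/oltaaz/GreenNet | _exports/GreenNet_progress_review_bundle_20260410/greennet/evaluation/final_report.py | _common_text
-- ===== SOURCE A (Python) =====
-- from typing import Any, Dict, Iterable, List, Mapping, Sequence
--
-- def _common_text(rows: Sequence[Mapping[str, Any]], field: str) -> str | None:
--     values = {
--         str(row.get(field)).strip()
--         for row in rows
--         if row.get(field) not in ("", None)
--     }
--     if not values:
--         return None
--     if len(values) == 1:
--         return next(iter(values))
--     return "mixed"
-- ===== SOURCE B (Python) =====
-- def _common_text(rows, field):
--     cand = None
--     for row in rows: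
--         v = row.get(field)
--         if v in ("", None):
--             continue
--         s = str(v).strip()
--         if cand is None:
--             cand = s
--         elif s != cand:
--             return "mixed"
--     return cand
-- ===== Notes on version B (the rewrite author's own statement) =====
-- stated objective: simpler
-- what changed: Replaces the distinct-value set comprehension plus size inspection by a single pass that tracks one candidate string and returns 'mixed' immediately on the second distinct value.
import Mathlib
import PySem

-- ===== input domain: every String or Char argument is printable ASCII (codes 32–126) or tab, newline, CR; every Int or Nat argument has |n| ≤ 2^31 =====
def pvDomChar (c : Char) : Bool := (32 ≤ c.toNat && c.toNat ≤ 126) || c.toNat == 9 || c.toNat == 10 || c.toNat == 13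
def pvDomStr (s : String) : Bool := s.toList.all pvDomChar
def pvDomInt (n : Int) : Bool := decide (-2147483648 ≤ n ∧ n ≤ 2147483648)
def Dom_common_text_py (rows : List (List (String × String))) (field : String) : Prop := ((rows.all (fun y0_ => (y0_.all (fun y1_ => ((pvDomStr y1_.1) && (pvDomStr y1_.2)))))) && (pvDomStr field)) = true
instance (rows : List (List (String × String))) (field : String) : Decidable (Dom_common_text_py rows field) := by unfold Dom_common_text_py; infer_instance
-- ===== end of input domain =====

-- B replaces A's distinct-value set with a single pass tracking one candidate and an early 'mixed' exit (simpler decomposition, same cost).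


-- ===== PORT A =====
-- loop body of the set comprehension: add str(row.get(field)).strip() when row.get(field) not in ("", None)
def ctStep (field : String) (acc : PySem.Set String) (row : List (String × String)) : PySem.Set String :=
  match (PySem.Dict.mk row).get? field with
  | none => acc
  | some v => if v = "" then acc else PySem.Set.add acc (PySem.Str.strip v)

def common_text_py (rows : List (List (String × String))) (field : String) : Option String :=
  let values : PySem.Set String := rows.foldl (ctStep field) PySem.Set.empty
  match values with
  | [] => none            -- if not values: return None
  | [s] => some s         -- if len(values) == 1: return next(iter(values))
  | _ => some "mixed"     -- return "mixed"

-- ===== PORT B =====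
-- explicit pass with one candidate variable (None = unset), early return "mixed"
def ctGo (field : String) : List (List (String × String)) → Option String → Option String
  | [], cand => cand
  | row :: rest, cand =>
    match (PySem.Dict.mk row).get? field with
    | none => ctGo field rest cand
    | some v =>
      if v = "" then ctGo field rest cand
      else
        let s := PySem.Str.strip v
        match cand with
        | none => ctGo field rest (some s)
        | some c => if s = c then ctGo field rest cand else some "mixed"

def common_text_py_alt (rows : List (List (String × String))) (field : String) : Option String :=
  ctGo field rows none

-- ===== PRECONDITION & SPEC =====
def Spec_common_text_py (rows : List (List (String × String))) (field : String) (out : Option String) : Prop := out = common_text_py_alt rows field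
instance (rows : List (List (String × String))) (field : String) (out : Option String) : Decidable (Spec_common_text_py rows field out) := by unfold Spec_common_text_py; infer_instance

-- ===== CLAIM (what is proved, stated in full; the proofs are below) =====
def Claim_equal_common_text_py : Prop := ∀ (rows : List (List (String × String))) (field : String), Dom_common_text_py rows field → Spec_common_text_py rows field (common_text_py rows field)

-- ===== LEMMAS AND PROOFS =====

-- the final size inspection of A, as a function of the accumulated set
def ctFinish (l : List String) : Option String :=
  match l with
  | [] => none
  | [s] => some s
  | _ => some "mixed"

theorem ctStep_length_le (field : String) (acc : PySem.Set String)
    (row : List (String × String)) : acc.length ≤ (ctStep field acc row).length := by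
  unfold ctStep
  cases (PySem.Dict.mk row).get? field with
  | none => exact le_refl _
  | some v =>
    by_cases h : v = "" <;> simp [h, PySem.Set.add]
    split <;> simp

theorem ctFoldl_length_le (field : String) (rows : List (List (String × String)))
    (acc : PySem.Set String) : acc.length ≤ (rows.foldl (ctStep field) acc).length := by
  induction rows generalizing acc with
  | nil => exact le_refl _
  | cons r rs ih => exact le_trans (ctStep_length_le field acc r) (ih _)

theorem ctFinish_of_two_le {l : List String} (h : 2 ≤ l.length) :
    ctFinish l = some "mixed" := by
  match l, h with
  | a :: b :: t, _ => rfl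

-- main invariant: A's finish of the fold from acc equals B's loop from cand,
-- whenever acc and cand are in correspondence ([] ↔ none, [c] ↔ some c)
theorem ct_main (field : String) (rows : List (List (String × String)))
    (acc : PySem.Set String) (cand : Option String)
    (h : (acc = [] ∧ cand = none) ∨ (∃ c, acc = [c] ∧ cand = some c)) :
    ctFinish (rows.foldl (ctStep field) acc) = ctGo field rows cand := by
  induction rows generalizing acc cand with
  | nil =>
    rcases h with ⟨ha, hc⟩ | ⟨c, ha, hc⟩ <;> simp [ha, hc, ctFinish, ctGo]
  | cons row rest ih =>
    simp only [List.foldl_cons, ctGo]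
    cases hg : (PySem.Dict.mk row).get? field with
    | none => simp [ctStep, hg]; exact ih _ _ h
    | some v =>
      by_cases hv : v = ""
      · simp [ctStep, hg, hv]; exact ih _ _ h
      · simp only [ctStep, hg, if_neg hv]
        rcases h with ⟨ha, hc⟩ | ⟨c, ha, hc⟩
        · subst ha; subst hc
          have : PySem.Set.add ([] : PySem.Set String) (PySem.Str.strip v) = [PySem.Str.strip v] := by
            simp [PySem.Set.add]
          rw [this]
          exact ih _ _ (Or.inr ⟨_, rfl, rfl⟩)
        · subst ha; subst hc
          by_cases hs : PySem.Str.strip v = c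
          · have hct : PySem.Set.contains [c] (PySem.Str.strip v) = true := by
              simp [PySem.Set.contains_eq_listContains, hs]
            have : PySem.Set.add [c] (PySem.Str.strip v) = [c] := by
              simp only [PySem.Set.add, hct, if_true]
            rw [this]
            simp only [hs, ite_true]
            exact ih _ _ (Or.inr ⟨_, rfl, rfl⟩)
          · have hct : PySem.Set.contains [c] (PySem.Str.strip v) = false := by
              simp [PySem.Set.contains_eq_listContains]
              exact hs
            have hadd : PySem.Set.add [c] (PySem.Str.strip v) = [c, PySem.Str.strip v] := by
              simp only [PySem.Set.add, hct]
              simp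
            rw [hadd]
            simp only [if_neg hs]
            have hlen : 2 ≤ (rest.foldl (ctStep field) [c, PySem.Str.strip v]).length := by
              have := ctFoldl_length_le field rest [c, PySem.Str.strip v]
              simpa using this
            exact ctFinish_of_two_le hlen

-- ===== VERDICT (by name: the statement is the Claim_ definition above) =====
theorem common_text_py_spec : Claim_equal_common_text_py := by
  intro rows field _
  show common_text_py rows field = common_text_py_alt rows field
  have h := ct_main field rows PySem.Set.empty none (Or.inl ⟨rfl, rfl⟩)
  simpa [common_text_py, common_text_py_alt, ctFinish, PySem.Set.empty] using h
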